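-- pv_equiv track=rewrite | github.com/ggetzie/nnr | recipes/collect/books.py | tag_title_end
-- ===== SOURCE A (Python) =====
-- def tag_title_end(booklines, start_line):
--     outlines = []
--     last_line = booklines[start_line]
--     for line in booklines[start_line+1:]:
--         if line == "#quantity":
--             outlines.append("#end")
--             outlines.append("#title")
--             outlines.append(last_line)
--         else:
--             outlines.append(last_line)
--         last_line = line
--     outlines.append(last_line)
--     return booklines[:start_line] + outlines
-- ===== SOURCE B (Python) =====
-- def tag_title_end(booklines, start_line):
--     tail = booklines[start_line:]
--     marks = {i for i in range(len(tail) - 1) if tail[i + 1] == "#quantity"}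
--     out = list(booklines[:start_line])
--     for i in range(len(tail)):
--         if i in marks:
--             out += ["#end", "#title", tail[i]]
--         else:
--             out.append(tail[i])
--     return out
-- ===== Notes on version B (the rewrite author's own statement) =====
-- stated objective: alternative
-- what changed: A streams once with a lagging last_line buffer and a final flush; B slices the tail, precomputes a set of marker indices (positions whose successor is '#quantity') in a first pass, then emits by index in a second pass with no carried state.
-- intended difference: For start_line == -1 (nonempty list) A's start_line+1 flips to 0, so A re-emits the whole list after the prefix (e.g. ['x'] -> ['x','x']); B treats -1 as the last index and returns booklines unchanged, the intended meaning of 'process from that line on'. — e.g. on tag_title_end(["x"], -1): A returns ["x", "x"], B returns ["x"]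
import Mathlib
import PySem

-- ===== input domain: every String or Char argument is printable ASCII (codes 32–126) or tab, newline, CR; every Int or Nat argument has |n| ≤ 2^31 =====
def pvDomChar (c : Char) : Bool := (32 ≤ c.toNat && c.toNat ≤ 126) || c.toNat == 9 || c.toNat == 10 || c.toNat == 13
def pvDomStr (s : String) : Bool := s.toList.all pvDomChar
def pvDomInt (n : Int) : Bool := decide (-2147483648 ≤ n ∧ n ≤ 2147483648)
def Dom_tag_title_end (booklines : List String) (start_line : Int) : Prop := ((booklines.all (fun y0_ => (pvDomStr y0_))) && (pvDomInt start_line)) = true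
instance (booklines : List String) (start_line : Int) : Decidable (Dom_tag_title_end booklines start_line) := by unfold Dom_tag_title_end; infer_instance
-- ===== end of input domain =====

-- B replaces A's lagging-buffer single stream by a two-pass index decomposition (same cost, different structure).
-- Equivalence is about the RETURN value; neither program mutates its arguments.

-- ===== PORT A =====
def tag_title_end (booklines : List String) (start_line : Int) : List String :=
  match PySem.List.pyGet? booklines start_line with
  | none => []  -- IndexError in Python; excluded by Pre_tag_title_end
  | some first =>
    let p :=
      (PySem.List.slice booklines (some (start_line + 1)) none).foldl
        (fun (st : List String × String) line =>
          if line = "#quantity" then (st.1 ++ ["#end", "#title", st.2], line)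
          else (st.1 ++ [st.2], line))
        ([], first)
    PySem.List.slice booklines none (some start_line) ++ (p.1 ++ [p.2])

-- ===== PORT B =====
def tag_title_end_alt (booklines : List String) (start_line : Int) : List String :=
  let tail := PySem.List.slice booklines (some start_line) none
  let n : Int := tail.length
  let marks : PySem.Set Int :=
    PySem.Set.ofList ((PySem.List.pyRange 0 (n - 1) 1).filter
      (fun i => PySem.List.pyGetD tail (i + 1) "" == "#quantity"))
  (PySem.List.pyRange 0 n 1).foldl
    (fun out i =>
      if marks.contains i then out ++ ["#end", "#title", PySem.List.pyGetD tail i ""]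
      else out ++ [PySem.List.pyGetD tail i ""])
    (PySem.List.slice booklines none (some start_line))

-- ===== PRECONDITION & SPEC =====
-- Pre_: exactly the inputs where A's booklines[start_line] does not raise IndexError.
def Pre_tag_title_end (booklines : List String) (start_line : Int) : Prop :=
  PySem.Raise.InRange booklines.length start_line
instance (booklines : List String) (start_line : Int) : Decidable (Pre_tag_title_end booklines start_line) := by unfold Pre_tag_title_end; infer_instance
def pvWitness_tag_title_end : List String × Int := (["a", "#quantity", "b"], 0)

-- For start_line = -1 on a nonempty list, A's start_line+1 becomes 0, so A re-emits the whole list after the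
-- prefix (e.g. ['x'] ↦ ['x','x']); B treats -1 as the last index and returns the list unchanged, the intended
-- meaning of "process from that line on".
def D_tag_title_end (booklines : List String) (start_line : Int) : Prop := start_line = -1
instance (booklines : List String) (start_line : Int) : Decidable (D_tag_title_end booklines start_line) := by unfold D_tag_title_end; infer_instance

def Spec_tag_title_end (booklines : List String) (start_line : Int) (out : List String) : Prop :=
  ¬ D_tag_title_end booklines start_line → out = tag_title_end_alt booklines start_line
instance (booklines : List String) (start_line : Int) (out : List String) : Decidable (Spec_tag_title_end booklines start_line out) := by unfold Spec_tag_title_end; infer_instance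

def pvDiffWitness_tag_title_end : List String × Int := (["x"], -1)
def pvDiffWitnessOut_tag_title_end : (List String) × (List String) := (["x", "x"], ["x"])

-- ===== CLAIM (what is proved, stated in full; the proofs are below) =====
def Claim_unchanged_tag_title_end : Prop := ∀ (booklines : List String) (start_line : Int), Dom_tag_title_end booklines start_line → Pre_tag_title_end booklines start_line → Spec_tag_title_end booklines start_line (tag_title_end booklines start_line)
def Claim_changed_tag_title_end : Prop := Dom_tag_title_end (pvDiffWitness_tag_title_end.1) (pvDiffWitness_tag_title_end.2) ∧ Pre_tag_title_end (pvDiffWitness_tag_title_end.1) (pvDiffWitness_tag_title_end.2) ∧ D_tag_title_end (pvDiffWitness_tag_title_end.1) (pvDiffWitness_tag_title_end.2) ∧ tag_title_end (pvDiffWitness_tag_title_end.1) (pvDiffWitness_tag_title_end.2) = pvDiffWitnessOut_tag_title_end.1 ∧ tag_title_end_alt (pvDiffWitness_tag_title_end.1) (pvDiffWitness_tag_title_end.2) = pvDiffWitnessOut_tag_title_end.2 ∧ pvDiffWitnessOut_tag_title_end.1 ≠ pvDiffWitnessOut_tag_title_end.2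
def Claim_exact_tag_title_end : Prop := ∀ (booklines : List String) (start_line : Int), Dom_tag_title_end booklines start_line → Pre_tag_title_end booklines start_line → D_tag_title_end booklines start_line → tag_title_end booklines start_line ≠ tag_title_end_alt booklines start_line
-- ===== LEMMAS AND PROOFS =====

-- The emitted shape both programs realise on the tail: before each line whose successor is "#quantity",
-- insert "#end","#title".
def pvEmit : List String → List String
  | [] => []
  | x :: xs => (if xs.head? = some "#quantity" then ["#end", "#title", x] else [x]) ++ pvEmit xs

-- A's loop (state = (outlines, last_line)) followed by the final append realises pvEmit.
theorem pvFoldA_emit (rest : List String) : ∀ (first : String) (acc : List String),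
    (rest.foldl
        (fun (st : List String × String) line =>
          if line = "#quantity" then (st.1 ++ ["#end", "#title", st.2], line)
          else (st.1 ++ [st.2], line)) (acc, first)).1 ++
    [(rest.foldl
        (fun (st : List String × String) line =>
          if line = "#quantity" then (st.1 ++ ["#end", "#title", st.2], line)
          else (st.1 ++ [st.2], line)) (acc, first)).2]
    = acc ++ pvEmit (first :: rest) := by
  induction rest with
  | nil => intro first acc; simp [pvEmit]
  | cons y r ih =>
    intro first acc
    rw [List.foldl_cons]
    by_cases hy : y = "#quantity"
    · rw [if_pos hy]
      rw [show ((acc, first).1 ++ ["#end", "#title", (acc, first).2], y)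
            = (acc ++ ["#end", "#title", first], y) from rfl, ih y]
      simp [pvEmit, hy, List.append_assoc]
    · rw [if_neg hy]
      rw [show ((acc, first).1 ++ [(acc, first).2], y) = (acc ++ [first], y) from rfl, ih y]
      simp [pvEmit, hy, List.append_assoc]

-- The per-index piece B emits, as a function of the tail and the index.
def pvG (tail : List String) (i : Int) : List String :=
  if (PySem.Set.ofList ((PySem.List.pyRange 0 ((tail.length : Int) - 1) 1).filter
        (fun j => PySem.List.pyGetD tail (j + 1) "" == "#quantity"))).contains i
  then ["#end", "#title", PySem.List.pyGetD tail i ""]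
  else [PySem.List.pyGetD tail i ""]

theorem pvGetD_cons_shift (x : String) (xs : List String) (j : Int) (h0 : 0 ≤ j) :
    PySem.List.pyGetD (x :: xs) (j + 1) "" = PySem.List.pyGetD xs j "" := by
  rcases Int.eq_ofNat_of_zero_le h0 with ⟨n, rfl⟩
  rw [show ((n : Int) + 1) = ((n + 1 : Nat) : Int) by push_cast; ring]
  rw [PySem.List.pyGetD_natCast, PySem.List.pyGetD_natCast]
  simp

theorem pvG_zero (x : String) (xs : List String) :
    pvG (x :: xs) 0 = (if xs.head? = some "#quantity" then ["#end", "#title", x] else [x]) := by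
  unfold pvG
  cases xs with
  | nil =>
    rw [show (((x :: ([] : List String)).length : Int) - 1) = 0 by simp]
    rw [PySem.List.pyRange_one_eq_nil le_rfl]
    simp [PySem.Set.ofList, PySem.List.pyGetD_zero_cons]
  | cons z zs =>
    have hval : PySem.List.pyGetD (x :: z :: zs) (0 + 1) "" = z := by
      rw [pvGetD_cons_shift x (z :: zs) 0 le_rfl, PySem.List.pyGetD_zero_cons]
    have hc : ((PySem.Set.ofList ((PySem.List.pyRange 0 (((x :: z :: zs).length : Int) - 1) 1).filter
          (fun j => PySem.List.pyGetD (x :: z :: zs) (j + 1) "" == "#quantity"))).contains 0)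
        = (z == "#quantity") := by
      rw [Bool.eq_iff_iff]
      simp only [PySem.Set.contains_eq_listContains, List.contains_eq_mem, PySem.Set.mem_ofList,
                 decide_eq_true_eq, List.mem_filter, PySem.List.mem_pyRange_one, hval,
                 List.length_cons]
      constructor
      · rintro ⟨_, hq⟩; exact hq
      · intro hq
        refine ⟨⟨le_rfl, ?_⟩, hq⟩
        push_cast
        omega
    rw [hc, PySem.List.pyGetD_zero_cons]
    by_cases hz : z = "#quantity" <;> simp [hz]

theorem pvG_succ (x : String) (xs : List String) (i : Int) (h0 : 0 ≤ i) :
    pvG (x :: xs) (i + 1) = pvG xs i := by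
  unfold pvG
  have hc : ((PySem.Set.ofList ((PySem.List.pyRange 0 (((x :: xs).length : Int) - 1) 1).filter
        (fun j => PySem.List.pyGetD (x :: xs) (j + 1) "" == "#quantity"))).contains (i + 1))
      = ((PySem.Set.ofList ((PySem.List.pyRange 0 ((xs.length : Int) - 1) 1).filter
        (fun j => PySem.List.pyGetD xs (j + 1) "" == "#quantity"))).contains i) := by
    rw [Bool.eq_iff_iff]
    simp only [PySem.Set.contains_eq_listContains, List.contains_eq_mem, PySem.Set.mem_ofList,
               decide_eq_true_eq, List.mem_filter, PySem.List.mem_pyRange_one, List.length_cons]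
    constructor
    · rintro ⟨⟨ha, hb⟩, hq⟩
      refine ⟨⟨h0, by push_cast at hb ⊢; omega⟩, ?_⟩
      rw [← pvGetD_cons_shift x xs (i + 1) (by omega)]
      exact hq
    · rintro ⟨⟨ha, hb⟩, hq⟩
      refine ⟨⟨by omega, by push_cast at hb ⊢; omega⟩, ?_⟩
      rw [pvGetD_cons_shift x xs (i + 1) (by omega)]
      exact hq
  rw [hc, pvGetD_cons_shift x xs i h0]

theorem pvFlat_emit_aux (tail : List String) :
    (List.range tail.length).flatMap (fun (k : Nat) => pvG tail (k : Int)) = pvEmit tail := by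
  induction tail with
  | nil => simp [pvEmit]
  | cons x xs ih =>
    rw [List.length_cons, List.range_succ_eq_map, List.flatMap_cons, List.flatMap_map]
    have hmap : (List.range xs.length).flatMap ((fun (k : Nat) => pvG (x :: xs) (k : Int)) ∘ Nat.succ)
        = (List.range xs.length).flatMap (fun (k : Nat) => pvG xs (k : Int)) := by
      rw [List.flatMap_def, List.flatMap_def]
      congr 1
      apply List.map_congr_left
      intro k _
      have := pvG_succ x xs (k : Int) (by positivity)
      simpa using this
    rw [show (fun (a : Nat) => pvG (x :: xs) ((a.succ : Nat) : Int))
          = ((fun (k : Nat) => pvG (x :: xs) (k : Int)) ∘ Nat.succ) from rfl, hmap, ih,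
        Nat.cast_zero, pvG_zero]
    rfl

theorem pvFlat_emit (tail : List String) :
    (PySem.List.pyRange 0 (tail.length : Int) 1).flatMap (pvG tail) = pvEmit tail := by
  rw [PySem.List.pyRange_one, List.flatMap_map]
  rw [show ((tail.length : Int) - 0).toNat = tail.length by simp]
  simp only [zero_add]
  exact pvFlat_emit_aux tail

-- B's loop over range(len(tail)) realises pvEmit.
theorem pvFoldB_emit (tail acc : List String) :
    (PySem.List.pyRange 0 (tail.length : Int) 1).foldl
      (fun out i =>
        if (PySem.Set.ofList ((PySem.List.pyRange 0 ((tail.length : Int) - 1) 1).filter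
              (fun j => PySem.List.pyGetD tail (j + 1) "" == "#quantity"))).contains i
        then out ++ ["#end", "#title", PySem.List.pyGetD tail i ""]
        else out ++ [PySem.List.pyGetD tail i ""]) acc
    = acc ++ pvEmit tail := by
  have h := PySem.List.foldl_congr_mem
    (l := PySem.List.pyRange 0 (tail.length : Int) 1) (init := acc)
    (f := fun out i =>
        if (PySem.Set.ofList ((PySem.List.pyRange 0 ((tail.length : Int) - 1) 1).filter
              (fun j => PySem.List.pyGetD tail (j + 1) "" == "#quantity"))).contains i
        then out ++ ["#end", "#title", PySem.List.pyGetD tail i ""]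
        else out ++ [PySem.List.pyGetD tail i ""])
    (g := fun out i => out ++ pvG tail i)
    (by intro o i _; dsimp only; unfold pvG; split <;> rfl)
  rw [h, PySem.List.foldl_append_eq_flatMap, pvFlat_emit]

-- Splitting the tail slice at a valid start index other than -1.
theorem pvSlice_split (b : List String) (s : Int)
    (h : PySem.Raise.InRange b.length s) (h1 : s ≠ -1) :
    ∃ f rest, PySem.List.pyGet? b s = some f ∧
      PySem.List.slice b (some s) none = f :: rest ∧
      PySem.List.slice b (some (s + 1)) none = rest := by
  unfold PySem.Raise.InRange at h
  by_cases hs : 0 ≤ s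
  · have hlt : s.toNat < b.length := by omega
    refine ⟨b[s.toNat], b.drop (s.toNat + 1), ?_, ?_, ?_⟩
    · exact PySem.List.pyGet?_eq_some_getElem b hs (by omega)
    · rw [PySem.List.slice_from b hs]
      exact List.drop_eq_getElem_cons hlt
    · rw [PySem.List.slice_from b (by omega)]
      congr 1
      omega
  · -- s ≤ -2 here
    set k : Nat := (-s).toNat with hkdef
    have hk2 : 2 ≤ k := by omega
    have hkl : k ≤ b.length := by omega
    have hsk : s = -(k : Int) := by omega
    have hlt : b.length - k < b.length := by omega
    refine ⟨b[b.length - k], b.drop (b.length - k + 1), ?_, ?_, ?_⟩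
    · rw [hsk, PySem.List.pyGet?_neg_natCast b k (by omega) hkl]
      exact List.getElem?_eq_getElem hlt
    · rw [hsk, PySem.List.slice_from_neg_natCast b k (by omega)]
      exact List.drop_eq_getElem_cons hlt
    · have hs1 : s + 1 = -(((k - 1 : Nat)) : Int) := by omega
      rw [hs1, PySem.List.slice_from_neg_natCast b (k-1) (by omega)]
      congr 1
      omega

theorem pvEmit_length_ge (l : List String) : l.length ≤ (pvEmit l).length := by
  induction l with
  | nil => simp [pvEmit]
  | cons x xs ih => unfold pvEmit; split <;> simp <;> omega

theorem pvEmit_singleton (x : String) : pvEmit [x] = [x] := by simp [pvEmit]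

theorem pvDrop_pred (b : List String) (h : b ≠ []) :
    b.drop (b.length - 1) = [b.getLast h] := by
  induction b with
  | nil => exact absurd rfl h
  | cons x xs ih =>
    cases xs with
    | nil => simp
    | cons y ys =>
      have hne : (y :: ys) ≠ ([] : List String) := by simp
      have : (x :: y :: ys).length - 1 = (y :: ys).length := by simp
      rw [this]
      have hdrop : (x :: y :: ys).drop (y :: ys).length = (y :: ys).drop ((y :: ys).length - 1) := by
        cases ys <;> simp [List.drop]
      rw [hdrop, ih hne]
      simp [List.getLast]

-- ===== VERDICT (by name: the statement is the Claim_ definition above) =====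
theorem tag_title_end_spec : Claim_unchanged_tag_title_end := by
  intro b s _ hpre hnd
  have hs : s ≠ -1 := hnd
  obtain ⟨f, rest, hget, hsl, hsl1⟩ := pvSlice_split b s hpre hs
  show tag_title_end b s = tag_title_end_alt b s
  simp only [tag_title_end, tag_title_end_alt, hget, hsl, hsl1]
  rw [pvFoldB_emit (f :: rest) (PySem.List.slice b none (some s)),
      pvFoldA_emit rest f []]
  simp

theorem tag_title_end_changed : Claim_changed_tag_title_end := by
  unfold Claim_changed_tag_title_end; decide

theorem tag_title_end_tight : Claim_exact_tag_title_end := by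
  intro b s _ hpre hd
  have hs : s = -1 := hd
  subst hs
  unfold Pre_tag_title_end PySem.Raise.InRange at hpre
  have hne : b ≠ [] := by
    intro hnil; rw [hnil] at hpre; simp at hpre
  have hget : PySem.List.pyGet? b (-1) = some (b.getLast hne) := by
    rw [PySem.List.pyGet?_neg_one]
    exact List.getLast?_eq_some_getLast hne
  have hsl1 : PySem.List.slice b (some ((-1 : Int) + 1)) none = b := by
    norm_num
  have htail : PySem.List.slice b (some (-1)) none = [b.getLast hne] := by
    rw [PySem.List.slice_from_neg_one]
    exact pvDrop_pred b hne
  intro heq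
  have hA : tag_title_end b (-1)
      = PySem.List.slice b none (some (-1)) ++ pvEmit (b.getLast hne :: b) := by
    simp only [tag_title_end, hget, hsl1]
    rw [pvFoldA_emit b (b.getLast hne) []]
    simp
  have hB : tag_title_end_alt b (-1)
      = PySem.List.slice b none (some (-1)) ++ [b.getLast hne] := by
    simp only [tag_title_end_alt, htail]
    rw [pvFoldB_emit [b.getLast hne] (PySem.List.slice b none (some (-1)))]
    rw [pvEmit_singleton]
  rw [hA, hB] at heq
  have hlen := congrArg List.length heq
  simp only [List.length_append, List.length_cons, List.length_nil] at hlen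
  have h1 := pvEmit_length_ge (b.getLast hne :: b)
  simp only [List.length_cons] at h1
  have hbl : 0 < b.length := List.length_pos_of_ne_nil hne
  omega
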